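-- pv_equiv track=rewrite | github.com/usuaero/AirfoilDatabase | airfoil_db/poly_fits.py | compose_j
-- ===== SOURCE A (Python) =====
-- def compose_j(n, Nvec):
--     """
--     Eq. 4 in Poly Fits Derivation. Routine to compose the j counter from
--     the n values. Can also be used as Eq. 10 with the i counter and the nhat
--     values.
--
--     inputs:
--
--         n = list of integer values representing the independent variables'
--             exponents for the jth term in the multidimensional polynomial
--             function (Eq. 2)
--         Nvec = list of integers representing the polynomial order of the
--             independent variables
--
--     returns:
--
--         j = integer representing the column of the A matrix or the jth
--             polynomial coefficient
--     """
--     # calculate V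
--     V = len(Nvec)
--     # initialize j to 0
--     j = 0
--     # loop through independent variables
--     for v in range(1,V+1):
--         # initialize product series to 1
--         prod = 1
--         # loop through w values for product series
--         for w in range(v+1,V+1):
--             # multiply on the term to the product series
--             prod *= Nvec[w-1] + 1
--         # add on term onto j
--         j += n[v-1] * prod
--     return j
-- ===== SOURCE B (Python) =====
-- def compose_j(n, Nvec):
--     # Horner-style mixed-radix composition: one backward-free single pass,
--     # j = ((n[0]*(N1+1) + n[1])*(N2+1) + n[2]) ...  -- O(V) instead of O(V^2)
--     j = 0
--     for nv, N in zip(n, Nvec):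
--         j = j * (N + 1) + nv
--     return j
-- ===== Notes on version B (the rewrite author's own statement) =====
-- stated objective: faster
-- what changed: Replaces the nested loop (recomputing the suffix product of (Nvec[w]+1) for every term) by a single Horner-style pass that folds j = j*(N+1) + nv over zip(n, Nvec).
import Mathlib
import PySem

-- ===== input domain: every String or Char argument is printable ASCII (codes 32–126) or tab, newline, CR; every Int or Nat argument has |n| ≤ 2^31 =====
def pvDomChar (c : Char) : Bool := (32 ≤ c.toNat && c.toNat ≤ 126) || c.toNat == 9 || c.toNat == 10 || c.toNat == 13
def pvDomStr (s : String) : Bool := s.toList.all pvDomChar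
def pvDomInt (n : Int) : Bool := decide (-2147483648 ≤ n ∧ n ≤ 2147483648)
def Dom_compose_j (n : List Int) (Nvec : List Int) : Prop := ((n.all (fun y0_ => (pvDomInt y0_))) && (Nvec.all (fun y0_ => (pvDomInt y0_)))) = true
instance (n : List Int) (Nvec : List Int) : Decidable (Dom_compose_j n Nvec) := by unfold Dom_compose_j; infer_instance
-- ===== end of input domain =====

-- B replaces A's nested loop (a fresh suffix product per term) by one Horner-style
-- pass over zip(n, Nvec); measurably faster (O(V) vs O(V^2)).


-- ===== PORT A =====
def compose_j (n : List Int) (Nvec : List Int) : Int :=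
  let V : Int := Nvec.length
  (PySem.List.pyRange 1 (V + 1) 1).foldl (fun j v =>
    let prod := (PySem.List.pyRange (v + 1) (V + 1) 1).foldl
      (fun p w => p * (PySem.List.pyGetD Nvec (w - 1) 0 + 1)) 1
    j + PySem.List.pyGetD n (v - 1) 0 * prod) 0

-- ===== PORT B =====
def compose_j_alt (n : List Int) (Nvec : List Int) : Int :=
  (n.zip Nvec).foldl (fun j p => j * (p.2 + 1) + p.1) 0

-- ===== PRECONDITION & SPEC =====
-- Pre_ excludes exactly the inputs where Python A raises IndexError (n shorter than Nvec).
def Pre_compose_j (n : List Int) (Nvec : List Int) : Prop := Nvec.length ≤ n.length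
instance (n : List Int) (Nvec : List Int) : Decidable (Pre_compose_j n Nvec) := by
  unfold Pre_compose_j; infer_instance

def pvWitness_compose_j : List Int × List Int := ([2, 0, 3], [2, 1, 3])

def Spec_compose_j (n : List Int) (Nvec : List Int) (out : Int) : Prop := out = compose_j_alt n Nvec
instance (n : List Int) (Nvec : List Int) (out : Int) : Decidable (Spec_compose_j n Nvec out) := by unfold Spec_compose_j; infer_instance

-- ===== CLAIM (what is proved, stated in full; the proofs are below) =====
def Claim_equal_compose_j : Prop := ∀ (n : List Int) (Nvec : List Int), Dom_compose_j n Nvec → Pre_compose_j n Nvec → Spec_compose_j n Nvec (compose_j n Nvec)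
-- ===== LEMMAS AND PROOFS =====

/-- Product of (N+1) over a list, as A's inner loop computes it. -/
def prodP (Ns : List Int) : Int := Ns.foldl (fun p N => p * (N + 1)) 1

/-- Reference value: sum of n[k] * prod_{w>k}(Nvec[w]+1), structurally. -/
def gsum : List Int → List Int → Int
  | a :: n, _ :: Ns => a * prodP Ns + gsum n Ns
  | _, _ => 0

theorem foldl_mul_prodP (Ns : List Int) (p : Int) :
    Ns.foldl (fun p N => p * (N + 1)) p = p * prodP Ns := by
  induction Ns generalizing p with
  | nil => simp [prodP]
  | cons N Ns ih =>
    have h2 : prodP (N :: Ns) = (1 * (N + 1)) * prodP Ns := by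
      rw [prodP, List.foldl_cons, ih]
    rw [List.foldl_cons, ih, h2]; ring

theorem prodP_cons (N : Int) (Ns : List Int) : prodP (N :: Ns) = (N + 1) * prodP Ns := by
  rw [prodP, List.foldl_cons, foldl_mul_prodP]; ring

/-- Shift a step-1 range fold by one. -/
theorem foldl_pyRange_shift {α : Type} (F : α → Int → α) (a b : Int) (init : α) :
    (PySem.List.pyRange (a + 1) (b + 1) 1).foldl F init
      = (PySem.List.pyRange a b 1).foldl (fun acc j => F acc (j + 1)) init := by
  rw [PySem.List.pyRange_one, PySem.List.pyRange_one]
  have h : b + 1 - (a + 1) = b - a := by ring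
  rw [h, List.foldl_map, List.foldl_map]
  apply List.foldl_ext
  intro acc k _; ring_nf

/-- A's inner loop at outer index m computes prodP of the suffix. -/
theorem inner_eq (Nvec : List Int) (m : Nat) :
    (PySem.List.pyRange ((m : Int) + 1) ((Nvec.length : Int) + 1) 1).foldl
      (fun p w => p * (PySem.List.pyGetD Nvec (w - 1) 0 + 1)) 1
      = prodP (Nvec.drop m) := by
  rw [foldl_pyRange_shift]
  have h : ∀ (p : Int) (j : Int), p * (PySem.List.pyGetD Nvec (j + 1 - 1) 0 + 1)
      = p * (PySem.List.pyGetD Nvec j 0 + 1) := by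
    intro p j; norm_num
  simp only [h]
  rw [PySem.List.foldl_pyRange_pyGetD' Nvec 0 (fun p N => p * (N + 1)) 1 (Int.natCast_nonneg m)]
  rw [Int.toNat_natCast, foldl_mul_prodP, one_mul]

/-- A's port as a closed sum over range. -/
theorem compose_j_eq_sum (n Nvec : List Int) :
    compose_j n Nvec
      = ((List.range Nvec.length).map
          (fun k : Nat => PySem.List.pyGetD n (k : Int) 0 * prodP (Nvec.drop (k + 1)))).sum := by
  unfold compose_j
  rw [PySem.List.foldl_add]
  rw [PySem.List.pyRange_one]
  have h : (Nvec.length : Int) + 1 - 1 = (Nvec.length : Int) := by ring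
  rw [h, Int.toNat_natCast, List.map_map]
  simp only [zero_add]
  congr 1
  apply List.map_congr_left
  intro k hk
  simp only [Function.comp]
  have h1 : (1 : Int) + (k : Int) - 1 = (k : Int) := by ring
  have h3 := inner_eq Nvec (k + 1)
  push_cast at h3
  rw [h1, show (1 : Int) + (k : Int) + 1 = (k : Int) + 1 + 1 by ring, h3]

theorem pyGetD_cons_succ (a : Int) (n : List Int) (k : Nat) :
    PySem.List.pyGetD (a :: n) ((k : Int) + 1) 0 = PySem.List.pyGetD n (k : Int) 0 := by
  have : ((k : Int) + 1) = (((k + 1 : Nat) : Int)) := by push_cast; ring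
  rw [this, PySem.List.pyGetD_natCast, PySem.List.pyGetD_natCast]
  simp [List.getD]

/-- The closed sum equals the structural reference value. -/
theorem sum_eq_gsum (n Nvec : List Int) :
    ((List.range Nvec.length).map
        (fun k : Nat => PySem.List.pyGetD n (k : Int) 0 * prodP (Nvec.drop (k + 1)))).sum
      = gsum n Nvec := by
  induction Nvec generalizing n with
  | nil => simp [gsum]
  | cons N Ns ih =>
    cases n with
    | nil =>
      have hz : ∀ k ∈ List.range (N :: Ns).length,
          PySem.List.pyGetD ([] : List Int) k 0 * prodP ((N :: Ns).drop (k + 1)) = 0 := by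
        intro k _
        rw [PySem.List.pyGetD_natCast]
        simp [List.getD]
      rw [List.map_congr_left hz]
      simp [gsum]
    | cons a n =>
      rw [List.length_cons, List.range_succ_eq_map, List.map_cons, List.map_map,
        List.sum_cons]
      have hstep : ∀ k ∈ List.range Ns.length,
          ((fun k : Nat => PySem.List.pyGetD (a :: n) (k : Int) 0 * prodP ((N :: Ns).drop (k + 1)))
            ∘ Nat.succ) k
          = PySem.List.pyGetD n (k : Int) 0 * prodP (Ns.drop (k + 1)) := by
        intro k _
        simp only [Function.comp, Nat.succ_eq_add_one]
        have : ((k + 1 : Nat) : Int) = (k : Int) + 1 := by push_cast; ring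
        rw [this, pyGetD_cons_succ]
        rfl
      rw [List.map_congr_left hstep, ih n]
      simp only [gsum, List.drop_succ_cons, List.drop_zero]
      congr 1
      rw [PySem.List.pyGetD_natCast]
      simp [List.getD]

/-- B's Horner fold, generalized over the accumulator. -/
theorem horner_eq (n Nvec : List Int) (j : Int) (h : Nvec.length ≤ n.length) :
    (n.zip Nvec).foldl (fun j p => j * (p.2 + 1) + p.1) j
      = j * prodP Nvec + gsum n Nvec := by
  induction n generalizing Nvec j with
  | nil =>
    have : Nvec = [] := List.eq_nil_of_length_eq_zero (Nat.le_zero.mp h)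
    subst this; simp [prodP, gsum]
  | cons a n ih =>
    cases Nvec with
    | nil => simp [prodP, gsum]
    | cons N Ns =>
      rw [List.zip_cons_cons, List.foldl_cons,
        ih Ns _ (by simpa using h), prodP_cons]
      simp only [gsum]
      ring

-- ===== VERDICT (by name: the statement is the Claim_ definition above) =====
theorem compose_j_spec : Claim_equal_compose_j := by
  intro n Nvec _ hpre
  unfold Spec_compose_j compose_j_alt
  rw [compose_j_eq_sum, sum_eq_gsum, horner_eq n Nvec 0 hpre]
  ring
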